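-- pv_equiv track=rewrite | github.com/GroovyUnicyclist/AdventOfCode2020 | day6.py | count_union
-- ===== SOURCE A (Python) =====
-- def count_union(set_list):
--     final_set = set_list[0]
--     first = True
--     for answer_set in set_list:
--         if not first:
--             first = False
--         else:
--             final_set = final_set.intersection(answer_set)
--     return len(final_set)
-- ===== SOURCE B (Python) =====
-- def count_union(set_list):
--     n = len(set_list)
--     counts = {}
--     for answer_set in set_list:
--         for x in answer_set:
--             counts[x] = counts.get(x, 0) + 1
--     return sum(1 for c in counts.values() if c == n)
-- ===== Notes on version B (the rewrite author's own statement) =====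
-- stated objective: alternative
-- what changed: Replaces the fold of set intersections with a single tally pass: count in a dict how many sets contain each answer and return the number of answers whose count equals len(set_list); B returns 0 where A raises IndexError on an empty list (excluded by Pre_).
import Mathlib
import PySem

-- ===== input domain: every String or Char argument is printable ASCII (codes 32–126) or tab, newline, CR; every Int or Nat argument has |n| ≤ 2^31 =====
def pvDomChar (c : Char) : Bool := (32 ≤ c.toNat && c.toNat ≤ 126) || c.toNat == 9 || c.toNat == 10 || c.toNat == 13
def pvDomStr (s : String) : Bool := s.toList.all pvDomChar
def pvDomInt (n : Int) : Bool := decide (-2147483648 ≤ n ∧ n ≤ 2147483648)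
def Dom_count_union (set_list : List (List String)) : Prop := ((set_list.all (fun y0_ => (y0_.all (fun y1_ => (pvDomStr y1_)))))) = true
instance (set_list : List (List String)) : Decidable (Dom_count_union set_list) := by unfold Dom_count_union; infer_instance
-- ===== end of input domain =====

-- B replaces A's fold of pairwise set intersections by one tally pass (count per element,
-- then count the elements seen len(set_list) times) — a different algorithm of the same cost.

-- ===== PORT A =====
-- final_set = set_list[0]; then for each answer_set, the (dead) 'first' flag test always
-- takes the else branch, so final_set is intersected with every set; return len(final_set).
def count_union (set_list : List (List String)) : Int :=
  match PySem.List.pyGet? set_list 0 with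
  | none => 0   -- Python raises IndexError here; excluded by Pre_count_union
  | some fs =>
    let r := set_list.foldl
      (fun (st : PySem.Set String × Bool) answer_set =>
        if !st.2 then (st.1, false)
        else (PySem.Set.inter st.1 answer_set, st.2))
      (fs, true)
    (PySem.Set.len r.1 : Int)

-- ===== PORT B =====
-- n = len(set_list); a dict tallies, for every element, in how many sets it occurs;
-- the result is the number of tallied values equal to n.
def count_union_alt (set_list : List (List String)) : Int :=
  let n : Int := set_list.length
  let counts := set_list.foldl
    (fun d answer_set => answer_set.foldl (fun d x => d.insert x (d.getD x 0 + 1)) d)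
    (PySem.Dict.empty : PySem.Dict String Int)
  ((PySem.Dict.values counts).countP (fun c => c == n) : Int)

-- ===== PRECONDITION & SPEC =====
-- Pre_ excludes the empty list (A raises IndexError on set_list[0]) and inner lists with
-- duplicates, which do not encode Python sets (the parameter is a list of sets; a set's
-- List encoding holds distinct elements).
def Pre_count_union (set_list : List (List String)) : Prop :=
  set_list ≠ [] ∧ ∀ s ∈ set_list, s.Nodup
instance (set_list : List (List String)) : Decidable (Pre_count_union set_list) := by
  unfold Pre_count_union; infer_instance
def pvWitness_count_union : List (List String) := [["a", "b"], ["b"]]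

def Spec_count_union (set_list : List (List String)) (out : Int) : Prop := out = count_union_alt set_list
instance (set_list : List (List String)) (out : Int) : Decidable (Spec_count_union set_list out) := by unfold Spec_count_union; infer_instance

-- ===== CLAIM (what is proved, stated in full; the proofs are below) =====
def Claim_equal_count_union : Prop := ∀ (set_list : List (List String)), Dom_count_union set_list → Pre_count_union set_list → Spec_count_union set_list (count_union set_list)

-- ===== LEMMAS AND PROOFS =====

-- A's 'first' flag is dead: it starts true and only the else branch ever runs.
lemma foldA_flag (l : List (List String)) (s : PySem.Set String) :
    l.foldl
      (fun (st : PySem.Set String × Bool) answer_set =>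
        if !st.2 then (st.1, false)
        else (PySem.Set.inter st.1 answer_set, st.2))
      (s, true)
    = (l.foldl PySem.Set.inter s, true) := by
  induction l generalizing s with
  | nil => rfl
  | cons a t ih => simpa using ih (PySem.Set.inter s a)

lemma foldl_inter_eq_filter (l : List (List String)) (s : List String) :
    l.foldl PySem.Set.inter s
      = s.filter (fun x => l.all (fun a => PySem.Set.contains a x)) := by
  induction l generalizing s with
  | nil => simp
  | cons a t ih =>
    show t.foldl PySem.Set.inter (PySem.Set.inter s a) = _
    rw [ih]
    show (s.filter (fun x => PySem.Set.contains a x)).filter _ = _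
    simp [List.filter_filter, Bool.and_comm]

lemma count_flatten_le (l : List (List String)) (hnd : ∀ s ∈ l, s.Nodup) (x : String) :
    l.flatten.count x ≤ l.length := by
  induction l with
  | nil => simp
  | cons a t ih =>
    have ha : a.count x ≤ 1 :=
      List.nodup_iff_count_le_one.mp (hnd a (by simp)) x
    have ht := ih (fun s hs => hnd s (by simp [hs]))
    simp only [List.flatten_cons, List.count_append, List.length_cons]
    omega

lemma count_flatten_eq_iff (l : List (List String)) (hnd : ∀ s ∈ l, s.Nodup) (x : String) :
    l.flatten.count x = l.length ↔ ∀ s ∈ l, x ∈ s := by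
  induction l with
  | nil => simp
  | cons a t ih =>
    have ha : a.count x ≤ 1 :=
      List.nodup_iff_count_le_one.mp (hnd a (by simp)) x
    have ht : t.flatten.count x ≤ t.length :=
      count_flatten_le t (fun s hs => hnd s (by simp [hs])) x
    have iht := ih (fun s hs => hnd s (by simp [hs]))
    simp only [List.flatten_cons, List.count_append, List.length_cons, List.mem_cons]
    constructor
    · intro hsum
      have h1 : a.count x = 1 := by omega
      have h2 : t.flatten.count x = t.length := by omega
      intro s hs
      rcases hs with rfl | hs
      · exact List.count_pos_iff.mp (by omega)
      · exact (iht.mp h2) s hs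
    · intro hmem
      have h1 : a.count x = 1 :=
        List.count_eq_one_of_mem (hnd a (by simp)) (hmem a (Or.inl rfl))
      have h2 : t.flatten.count x = t.length := iht.mpr (fun s hs => hmem s (Or.inr hs))
      omega

-- B's tally dict is Counter(flattened input).
lemma counts_eq_counter (l : List (List String)) :
    l.foldl
      (fun d answer_set => answer_set.foldl (fun d x => d.insert x (d.getD x 0 + 1)) d)
      (PySem.Dict.empty : PySem.Dict String Int)
    = PySem.Dict.counter l.flatten := by
  rw [← PySem.Dict.foldl_insert_getD_add_one_eq_counter, List.foldl_flatten]

theorem count_union_spec_aux (set_list : List (List String))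
    (hpre : Pre_count_union set_list) :
    count_union set_list = count_union_alt set_list := by
  obtain ⟨hne, hnd⟩ := hpre
  obtain ⟨h, t, rfl⟩ := List.exists_cons_of_ne_nil hne
  have hA : count_union (h :: t)
      = ((h.filter (fun x => (h :: t).all (fun a => PySem.Set.contains a x))).length : Int) := by
    unfold count_union
    rw [show PySem.List.pyGet? (h :: t) (0 : Int) = some h by
      simp [PySem.List.pyGet?, PySem.List.pyIdx?]]
    simp only [foldA_flag, foldl_inter_eq_filter]
    rfl
  have hv : PySem.Dict.values (PySem.Dict.counter (h :: t).flatten)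
      = (PySem.Set.ofList (h :: t).flatten).map (fun k => ((h :: t).flatten.count k : Int)) := by
    simp only [PySem.Dict.values, PySem.Dict.items_counter, List.map_map]
    rfl
  have hB : count_union_alt (h :: t)
      = (((PySem.Set.ofList (h :: t).flatten).countP
            (fun k => (((h :: t).flatten.count k : Int) == ((h :: t).length : Int)))) : Int) := by
    unfold count_union_alt
    simp only [counts_eq_counter, hv, List.countP_map]
    rfl
  have hndall : ∀ s ∈ (h :: t), s.Nodup := hnd
  have key : (h.filter (fun x => (h :: t).all (fun a => PySem.Set.contains a x))).length
      = ((PySem.Set.ofList (h :: t).flatten).filter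
          (fun k => (((h :: t).flatten.count k : Int) == ((h :: t).length : Int)))).length := by
    apply List.Perm.length_eq
    apply (List.perm_ext_iff_of_nodup ((hndall h (by simp)).filter _)
      (List.Nodup.filter _ (PySem.Set.nodup_ofList _))).2
    intro x
    simp only [List.mem_filter, PySem.Set.mem_ofList, List.all_eq_true, beq_iff_eq,
      Nat.cast_inj, List.mem_flatten]
    constructor
    · rintro ⟨hxh, hall⟩
      have hmem : ∀ s ∈ (h :: t), x ∈ s := by
        intro s hs
        have := hall s hs
        simpa [PySem.Set.contains_iff] using this
      exact ⟨⟨h, by simp, hxh⟩, (count_flatten_eq_iff (h :: t) hndall x).mpr hmem⟩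
    · rintro ⟨-, hc⟩
      have hmem := (count_flatten_eq_iff (h :: t) hndall x).mp hc
      refine ⟨hmem h (by simp), ?_⟩
      intro s hs
      simpa [PySem.Set.contains_iff] using hmem s hs
  rw [hA, hB, List.countP_eq_length_filter, key]

-- ===== VERDICT (by name: the statement is the Claim_ definition above) =====
theorem count_union_spec : Claim_equal_count_union := by
  intro set_list _ hpre
  exact count_union_spec_aux set_list hpre
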